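-- pv_equiv track=rewrite | github.com/WSQsGithub/TranscribeNote | caption_processor.py | process_to_paragraphs
-- ===== SOURCE A (Python) =====
-- def process_to_paragraphs(captions, max_lines=5):
--     paragraphs = []
--     current_paragraph = []
--
--     for line in captions:
--         current_paragraph.append(line)
--         if len(current_paragraph) >= max_lines:
--             paragraphs.append(' '.join(current_paragraph))
--             current_paragraph = []
--
--     # Add remaining lines as a paragraph
--     if current_paragraph:
--         paragraphs.append(' '.join(current_paragraph))
--
--     return paragraphs
-- ===== SOURCE B (Python) =====
-- def process_to_paragraphs(captions, max_lines=5):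
--     return [' '.join(captions[i:i + max_lines])
--             for i in range(0, len(captions), max_lines)]
-- ===== Notes on version B (the rewrite author's own statement) =====
-- stated objective: idiomatic
-- what changed: B computes chunk boundaries up front by striding over indices with range(0, len, max_lines) and joining each slice, instead of A's running buffer that flushes when full plus a separate trailing-remainder flush.
-- outside the precondition, e.g. on process_to_paragraphs(['a', 'b'], 0): A returns ['a', 'b'], B raises ValueError; on process_to_paragraphs(['a', 'b'], -1): A returns ['a', 'b'], B returns []
import Mathlib
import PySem

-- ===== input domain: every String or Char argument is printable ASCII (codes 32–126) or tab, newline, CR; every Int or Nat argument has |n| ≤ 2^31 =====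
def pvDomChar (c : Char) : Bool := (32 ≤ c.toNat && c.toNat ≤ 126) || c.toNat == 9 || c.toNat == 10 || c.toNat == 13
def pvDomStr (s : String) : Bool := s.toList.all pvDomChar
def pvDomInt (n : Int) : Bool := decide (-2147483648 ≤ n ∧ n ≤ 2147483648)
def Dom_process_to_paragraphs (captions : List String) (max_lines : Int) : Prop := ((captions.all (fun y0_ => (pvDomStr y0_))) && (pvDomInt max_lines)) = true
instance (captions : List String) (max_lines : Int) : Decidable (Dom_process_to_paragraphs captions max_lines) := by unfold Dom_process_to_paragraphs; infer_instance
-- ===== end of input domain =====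

-- B groups the lines by slicing at precomputed stride boundaries instead of A's running
-- buffer with two flush sites; equivalence is claimed for max_lines ≥ 1 (see Pre_).

-- ===== PORT A =====
-- the for-loop over captions with state (paragraphs, current_paragraph), then the final flush
def pvGoA (captions : List String) (paragraphs current : List String) (m : Int) : List String :=
  match captions with
  | [] => if current ≠ [] then paragraphs ++ [PySem.Str.join " " current] else paragraphs
  | line :: rest =>
    let cur := current ++ [line]
    if m ≤ (cur.length : Int) then pvGoA rest (paragraphs ++ [PySem.Str.join " " cur]) [] m
    else pvGoA rest paragraphs cur m

def process_to_paragraphs (captions : List String) (max_lines : Int) : List String :=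
  pvGoA captions [] [] max_lines

-- ===== PORT B =====
-- [' '.join(captions[i:i+max_lines]) for i in range(0, len(captions), max_lines)]
def process_to_paragraphs_alt (captions : List String) (max_lines : Int) : List String :=
  (PySem.List.pyRange 0 (captions.length : Int) max_lines).map
    (fun i => PySem.Str.join " " (PySem.List.slice captions (some i) (some (i + max_lines))))

-- ===== PRECONDITION & SPEC =====
-- Pre_ restricts to the natural domain max_lines ≥ 1: on max_lines ≤ 0 A accidentally emits
-- one paragraph per line (the buffer flushes immediately), while B's range() raises
-- ValueError for step 0 and is empty for a negative step.
def Pre_process_to_paragraphs (captions : List String) (max_lines : Int) : Prop := 1 ≤ max_lines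
instance (captions : List String) (max_lines : Int) : Decidable (Pre_process_to_paragraphs captions max_lines) := by unfold Pre_process_to_paragraphs; infer_instance

def pvWitness_process_to_paragraphs : List String × Int := (["a", "b", "c"], 2)

def Spec_process_to_paragraphs (captions : List String) (max_lines : Int) (out : List String) : Prop := out = process_to_paragraphs_alt captions max_lines
instance (captions : List String) (max_lines : Int) (out : List String) : Decidable (Spec_process_to_paragraphs captions max_lines out) := by unfold Spec_process_to_paragraphs; infer_instance

-- ===== CLAIM (what is proved, stated in full; the proofs are below) =====
def Claim_equal_process_to_paragraphs : Prop := ∀ (captions : List String) (max_lines : Int), Dom_process_to_paragraphs captions max_lines → Pre_process_to_paragraphs captions max_lines → Spec_process_to_paragraphs captions max_lines (process_to_paragraphs captions max_lines)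

-- ===== LEMMAS AND PROOFS =====

-- common characterisation: the chunks of size m, each joined with ' '
def pvChunksJoin (m : Nat) : List String → List String
  | [] => []
  | x :: xs =>
    PySem.Str.join " " (x :: xs.take (m - 1)) :: pvChunksJoin m (xs.drop (m - 1))
termination_by l => l.length
decreasing_by simp only [List.length_drop, List.length_cons]; omega

lemma pvChunksJoin_nil (m : Nat) : pvChunksJoin m [] = [] := by
  unfold pvChunksJoin
  rfl

lemma pvChunksJoin_of_ne_nil (m : Nat) (hm : 1 ≤ m) (l : List String) (hl : l ≠ []) :
    pvChunksJoin m l = PySem.Str.join " " (l.take m) :: pvChunksJoin m (l.drop m) := by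
  cases l with
  | nil => exact absurd rfl hl
  | cons x xs =>
    obtain ⟨k, rfl⟩ : ∃ k, m = k + 1 := ⟨m - 1, by omega⟩
    conv_lhs => rw [pvChunksJoin]
    simp

lemma pvGoA_eq (m : Int) (hm : 1 ≤ m) :
    ∀ (captions cur ps : List String), (cur.length : Int) < m →
      pvGoA captions ps cur m = ps ++ pvChunksJoin m.toNat (cur ++ captions) := by
  intro captions
  induction captions with
  | nil =>
    intro cur ps hcur
    cases cur with
    | nil => simp [pvGoA, pvChunksJoin_nil]
    | cons x xs =>
      rw [pvGoA]
      simp only [List.length_cons, Nat.cast_add, Nat.cast_one] at hcur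
      have ht : xs.take (m.toNat - 1) = xs := List.take_of_length_le (by omega)
      have hd : xs.drop (m.toNat - 1) = [] := List.drop_eq_nil_of_le (by omega)
      rw [List.append_nil, pvChunksJoin]
      simp only [ht, hd, pvChunksJoin_nil]
      simp
  | cons line rest ih =>
    intro cur ps hcur
    rw [pvGoA]
    by_cases h : m ≤ ((cur ++ [line]).length : Int)
    · have hlen : (cur ++ [line]).length = m.toNat := by
        simp only [List.length_append, List.length_singleton] at h ⊢
        omega
      rw [if_pos h, ih [] (ps ++ [PySem.Str.join " " (cur ++ [line])]) (by simpa using hm)]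
      simp only [List.nil_append]
      have hassoc : cur ++ line :: rest = (cur ++ [line]) ++ rest := by simp
      have ht : ((cur ++ [line]) ++ rest).take m.toNat = cur ++ [line] := by
        rw [← hlen]; exact List.take_left
      have hd : ((cur ++ [line]) ++ rest).drop m.toNat = rest := by
        rw [← hlen]; exact List.drop_left
      rw [hassoc, pvChunksJoin_of_ne_nil m.toNat (by omega) ((cur ++ [line]) ++ rest) (by simp),
        ht, hd]
      simp
    · rw [if_neg h, ih (cur ++ [line]) ps (by simpa using lt_of_not_ge h)]
      simp

lemma pvPyRange_pos_nil (a b s : Int) (hs : 0 < s) (hba : b ≤ a) :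
    PySem.List.pyRange a b s = [] := by
  rw [PySem.List.pyRange_of_pos a b hs, if_neg (by omega)]
  simp

lemma pvPyRange_pos_cons (a b s : Int) (hs : 0 < s) (hab : a < b) :
    PySem.List.pyRange a b s = a :: PySem.List.pyRange (a + s) b s := by
  rw [PySem.List.pyRange_of_pos a b hs, PySem.List.pyRange_of_pos (a + s) b hs, if_pos hab]
  by_cases h : a + s < b
  · rw [if_pos h]
    have e1 : b - a + s - 1 = (b - (a + s) + s - 1) + 1 * s := by ring
    have hq : 0 ≤ (b - (a + s) + s - 1) / s := Int.ediv_nonneg (by omega) (by omega)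
    rw [e1, Int.add_mul_ediv_right _ _ (by omega),
      show ((b - (a + s) + s - 1) / s + 1).toNat = ((b - (a + s) + s - 1) / s).toNat + 1 by omega,
      List.range_succ_eq_map, List.map_cons, List.map_map]
    simp only [Nat.cast_zero, mul_zero, add_zero]
    congr 1
    refine List.map_congr_left fun k _ => ?_
    simp only [Function.comp_apply]
    push_cast
    ring
  · rw [if_neg h]
    have e1 : b - a + s - 1 = (b - a - 1) + 1 * s := by ring
    have hz : (b - a - 1) / s = 0 := Int.ediv_eq_zero_of_lt (by omega) (by omega)
    rw [e1, Int.add_mul_ediv_right _ _ (by omega), hz]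
    simp

lemma pvB_eq (m : Int) (hm : 1 ≤ m) :
    ∀ (n : Nat) (captions pre : List String), captions.length ≤ n →
      (PySem.List.pyRange (pre.length : Int) ((pre.length : Int) + (captions.length : Int)) m).map
        (fun i => PySem.Str.join " " (PySem.List.slice (pre ++ captions) (some i) (some (i + m))))
      = pvChunksJoin m.toNat captions := by
  intro n
  induction n with
  | zero =>
    intro captions pre hlen
    have : captions = [] := List.eq_nil_of_length_eq_zero (by omega)
    subst this
    rw [pvPyRange_pos_nil _ _ _ (by omega) (by simp), List.map_nil, pvChunksJoin_nil]
  | succ n ih =>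
    intro captions pre hlen
    cases captions with
    | nil =>
      rw [pvPyRange_pos_nil _ _ _ (by omega) (by simp), List.map_nil, pvChunksJoin_nil]
    | cons x xs =>
      simp only [List.length_cons] at hlen
      have hmn : m = (m.toNat : Int) := by omega
      rw [pvPyRange_pos_cons _ _ _ (by omega)
        (by simp only [List.length_cons]; push_cast; omega), List.map_cons]
      have hhead : PySem.List.slice (pre ++ x :: xs) (some (pre.length : Int))
          (some ((pre.length : Int) + m)) = (x :: xs).take m.toNat := by
        conv_lhs => rw [hmn]
        rw [PySem.List.slice_natCast_add (pre ++ x :: xs) pre.length m.toNat, List.drop_left]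
      rw [hhead, pvChunksJoin_of_ne_nil m.toNat (by omega) (x :: xs) (by simp)]
      congr 1
      by_cases hc : m.toNat ≤ (x :: xs).length
      · -- a full chunk was taken; recurse with pre extended by it
        have hlt : ((x :: xs).drop m.toNat).length ≤ n := by
          simp only [List.length_drop, List.length_cons]
          omega
        have := ih ((x :: xs).drop m.toNat) (pre ++ (x :: xs).take m.toNat) hlt
        rw [List.append_assoc, List.take_append_drop] at this
        have hplen : ((pre ++ (x :: xs).take m.toNat).length : Int) = (pre.length : Int) + m := by
          simp only [List.length_cons] at hc
          simp only [List.length_append, List.length_take, List.length_cons]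
          push_cast
          omega
        have hb : (pre.length : Int) + m + (((x :: xs).drop m.toNat).length : Int)
            = (pre.length : Int) + ((x :: xs).length : Int) := by
          simp only [List.length_cons] at hc
          simp only [List.length_drop, List.length_cons]
          push_cast
          omega
        rw [hplen, hb] at this
        exact this
      · -- the first chunk already contains everything: both sides are empty
        rw [pvPyRange_pos_nil _ _ _ (by omega)
          (by simp only [List.length_cons] at hc ⊢; push_cast; omega)]
        rw [List.drop_eq_nil_of_le (by omega), List.map_nil, pvChunksJoin_nil]

-- ===== VERDICT (by name: the statement is the Claim_ definition above) =====
theorem process_to_paragraphs_spec : Claim_equal_process_to_paragraphs := by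
  intro captions max_lines _ hpre
  unfold Spec_process_to_paragraphs process_to_paragraphs process_to_paragraphs_alt
  rw [pvGoA_eq max_lines hpre captions [] [] (by simpa using hpre)]
  have := pvB_eq max_lines hpre captions.length captions [] le_rfl
  simp only [List.length_nil, Nat.cast_zero, zero_add, List.nil_append] at this
  rw [this]
  simp
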